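-- pv_equiv track=rewrite | github.com/fby6666/skills-repo | scripts/generate_page.py | to_kebab_case
-- ===== SOURCE A (Python) =====
-- def to_kebab_case(name: str) -> str:
--     """将名称转为 kebab-case"""
--     result = name.strip()
--     result = result.replace(' ', '-')
--     for ch in '/\\:*?"<>|_':
--         result = result.replace(ch, '-')
--     # 合并连续的 -
--     while '--' in result:
--         result = result.replace('--', '-')
--     return result.strip('-').lower()
-- ===== SOURCE B (Python) =====
-- def to_kebab_case(name: str) -> str:
--     """Kebab-case in one pass: map separators to '-', collapsing runs inline."""
--     seps = ' /\\:*?"<>|_-'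
--     out = []
--     for ch in name.strip():
--         if ch in seps:
--             if out and out[-1] == '-':
--                 continue
--             out.append('-')
--         else:
--             out.append(ch)
--     return ''.join(out).strip('-').lower()
-- ===== Notes on version B (the rewrite author's own statement) =====
-- stated objective: alternative
-- what changed: Replaces A's eleven full-string replace passes plus the repeated dash-collapse passes with a single character scan that maps separators to a dash and collapses dash runs inline via a last-appended check.
import Mathlib
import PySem

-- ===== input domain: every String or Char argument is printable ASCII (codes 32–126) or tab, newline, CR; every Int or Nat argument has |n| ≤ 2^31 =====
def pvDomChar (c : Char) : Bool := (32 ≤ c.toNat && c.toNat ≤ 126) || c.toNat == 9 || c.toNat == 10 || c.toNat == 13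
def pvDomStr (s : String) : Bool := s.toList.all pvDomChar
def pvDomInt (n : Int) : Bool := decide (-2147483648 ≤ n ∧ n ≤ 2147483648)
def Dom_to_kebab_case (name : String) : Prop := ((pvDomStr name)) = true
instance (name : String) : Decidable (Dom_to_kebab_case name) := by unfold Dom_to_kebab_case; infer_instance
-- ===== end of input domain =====

-- Alternative single-pass B: instead of A's eleven full-string replace passes plus the
-- repeated dash-collapse passes, one scan maps separators to a dash and collapses runs inline.

-- ===== PORT A =====
-- A-side helper: one pass of result.replace('--','-'), as structural recursion
-- (proved equal to PySem.Chars.replace below; needed to justify the while-loop's termination).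
def pvRep2 : List Char → List Char
  | [] => []
  | [x] => [x]
  | x :: y :: t => if x = '-' && y = '-' then '-' :: pvRep2 t else x :: pvRep2 (y :: t)

-- A-side helper: '--' occurs in l (adjacent dashes), structurally.
def pvHasDD : List Char → Bool
  | [] => false
  | [_] => false
  | x :: y :: t => (x = '-' && y = '-') || pvHasDD (y :: t)

theorem pvRep2_length_le (l : List Char) : (pvRep2 l).length ≤ l.length := by
  fun_induction pvRep2 l with
  | case1 => simp
  | case2 x => simp
  | case3 x y t h ih => simp at ih ⊢; omega
  | case4 x y t h ih => simp at ih ⊢; omega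

theorem pvGo_nil (old new acc : List Char) (fuel : Nat) :
    PySem.Chars.replace.go old new fuel [] acc = acc.reverse := by
  cases fuel <;> rw [PySem.Chars.replace.go] <;> simp

theorem pvGo_dd (fuel : Nat) (l acc : List Char) (h : l.length ≤ fuel) :
    PySem.Chars.replace.go ['-', '-'] ['-'] fuel l acc = acc.reverse ++ pvRep2 l := by
  induction fuel generalizing l acc with
  | zero =>
    have hl : l = [] := List.eq_nil_of_length_eq_zero (Nat.le_zero.mp h)
    subst hl
    rw [PySem.Chars.replace.go]
    simp [pvRep2]
  | succ n ih =>
    match l with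
    | [] =>
      rw [pvGo_nil]; simp [pvRep2]
    | [x] =>
      rw [PySem.Chars.replace.go]
      have hnp : ¬ (['-', '-'].isPrefixOf [x] = true) := by simp [List.isPrefixOf]
      rw [if_neg hnp, pvGo_nil]; simp [pvRep2]
    | x :: y :: t =>
      rw [PySem.Chars.replace.go]
      by_cases hp : x = '-' ∧ y = '-'
      · obtain ⟨hx, hy⟩ := hp; subst hx; subst hy
        have hc : (['-', '-'].isPrefixOf ('-' :: '-' :: t)) = true := by
          simp [List.isPrefixOf]
        rw [if_pos hc]
        have ht : t.length ≤ n := by simp at h; omega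
        have hdrop : List.drop (['-', '-'].length) ('-' :: '-' :: t) = t := by simp
        rw [hdrop, ih t _ ht]
        simp [pvRep2]
      · have hnp : ¬ (List.isPrefixOf ['-', '-'] (x :: y :: t) = true) := by
          simp [List.isPrefixOf]; tauto
        rw [if_neg hnp, ih (y :: t) (x :: acc) (by simp at h ⊢; omega)]
        simp only [pvRep2]
        rw [if_neg (by simpa using hp)]
        simp

theorem pvReplace_dd (l : List Char) : PySem.Chars.replace l ['-', '-'] ['-'] = pvRep2 l := by
  rw [PySem.Chars.replace]
  simpa using pvGo_dd l.length l [] le_rfl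

theorem pvHasDD_iff (l : List Char) : pvHasDD l = true ↔ ['-', '-'] <:+: l := by
  fun_induction pvHasDD l with
  | case1 =>
    constructor
    · intro h; simp at h
    · intro h; have := h.length_le; simp at this
  | case2 x =>
    constructor
    · intro h; simp at h
    · intro h; have := h.length_le; simp at this
  | case3 x y t ih =>
    rw [List.infix_cons_iff]
    simp only [Bool.or_eq_true, ih]
    constructor
    · rintro (h | h)
      · left
        simp only [Bool.and_eq_true, decide_eq_true_eq] at h
        obtain ⟨hx, hy⟩ := h; subst hx; subst hy
        exact ⟨t, rfl⟩
      · right; exact h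
    · rintro (h | h)
      · left
        obtain ⟨r, hr⟩ := h
        obtain ⟨h1, h2, -⟩ : x = '-' ∧ y = '-' ∧ t = r := by
          simpa using hr.symm
        subst h1; subst h2; simp
      · right; exact h

theorem pvRep2_length_lt (l : List Char) (h : pvHasDD l = true) :
    (pvRep2 l).length < l.length := by
  fun_induction pvRep2 l with
  | case1 => simp [pvHasDD] at h
  | case2 x => simp [pvHasDD] at h
  | case3 x y t hxy ih =>
    have := pvRep2_length_le t
    simp at this ⊢; omega
  | case4 x y t hxy ih =>
    simp only [pvHasDD, Bool.or_eq_true] at h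
    rcases h with h | h
    · exact absurd h (by simpa using hxy)
    · have := ih h; simp at this ⊢; omega

theorem pvLoop_dec (s : String) (h : PySem.Str.isIn "--" s = true) :
    (PySem.Str.replace s "--" "-").toList.length < s.toList.length := by
  have hin : ['-', '-'] <:+: s.toList := by
    simpa using (PySem.Str.isIn_iff_infix (sub := "--") (s := s)).mp h
  have hdd : pvHasDD s.toList = true := (pvHasDD_iff _).mpr hin
  have := pvRep2_length_lt s.toList hdd
  simpa [pvReplace_dd] using this

-- the 'while "--" in result: result = result.replace("--","-")' loop
def pvKebabLoop (s : String) : String :=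
  if h : PySem.Str.isIn "--" s = true then pvKebabLoop (PySem.Str.replace s "--" "-") else s
termination_by s.toList.length
decreasing_by exact pvLoop_dec s h

def to_kebab_case (name : String) : String :=
  let r0 := PySem.Str.strip name
  let r1 := PySem.Str.replace r0 " " "-"
  let r2 := ("/\\:*?\"<>|_".toList).foldl (fun r ch => PySem.Str.replace r (String.ofList [ch]) "-") r1
  let r3 := pvKebabLoop r2
  PySem.Str.lower (PySem.Str.stripChars r3 "-")

-- ===== PORT B =====
def to_kebab_case_alt (name : String) : String :=
  let seps := " /\\:*?\"<>|_-"
  let out := (PySem.Str.strip name).toList.foldl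
    (fun out ch =>
      if seps.toList.contains ch then
        -- 'if out and out[-1] == "-": continue' — last element of out is '-'
        if out.getLast? == some '-' then out else out ++ ['-']
      else out ++ [ch]) []
  PySem.Str.lower (PySem.Str.stripChars (String.ofList out) "-")

-- ===== PRECONDITION & SPEC =====
def Spec_to_kebab_case (name : String) (out : String) : Prop := out = to_kebab_case_alt name
instance (name : String) (out : String) : Decidable (Spec_to_kebab_case name out) := by unfold Spec_to_kebab_case; infer_instance

-- ===== CLAIM (what is proved, stated in full; the proofs are below) =====
def Claim_equal_to_kebab_case : Prop := ∀ (name : String), Dom_to_kebab_case name → Spec_to_kebab_case name (to_kebab_case name)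

-- ===== LEMMAS AND PROOFS =====

-- the separator set of B, and the character map A's replace chain computes
def pvIsSep (c : Char) : Bool := (" /\\:*?\"<>|_-".toList).contains c

def pvF (c : Char) : Char := if pvIsSep c then '-' else c

def pvSub (c x : Char) : Char := if x = c then '-' else x

-- look-behind dash-run collapse (b = "last emitted char was '-'")
def pvCb : Bool → List Char → List Char
  | _, [] => []
  | b, c :: t => if c = '-' && b then pvCb b t else c :: pvCb (c = '-') t

theorem pvGo_single (c : Char) (fuel : Nat) (l acc : List Char) (h : l.length ≤ fuel) :
    PySem.Chars.replace.go [c] ['-'] fuel l acc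
      = acc.reverse ++ l.map (pvSub c) := by
  induction fuel generalizing l acc with
  | zero =>
    have hl : l = [] := List.eq_nil_of_length_eq_zero (Nat.le_zero.mp h)
    subst hl
    rw [PySem.Chars.replace.go]
    simp
  | succ n ih =>
    match l with
    | [] =>
      rw [pvGo_nil]; simp
    | x :: t =>
      rw [PySem.Chars.replace.go]
      by_cases hx : x = c
      · subst hx
        have hc : ([x].isPrefixOf (x :: t)) = true := by simp [List.isPrefixOf]
        rw [if_pos hc]
        have hdrop : List.drop ([x].length) (x :: t) = t := by simp
        rw [hdrop, ih t _ (by simpa using h)]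
        simp [pvSub]
      · have hnp : ¬ (List.isPrefixOf [c] (x :: t) = true) := by
          simp [List.isPrefixOf]; exact fun hh => absurd hh.symm hx
        rw [if_neg hnp, ih t (x :: acc) (by simp at h ⊢; omega)]
        simp [pvSub, hx]
  
theorem pvReplace_single (c : Char) (l : List Char) :
    PySem.Chars.replace l [c] ['-'] = l.map (pvSub c) := by
  rw [PySem.Chars.replace]
  simpa using pvGo_single c l.length l [] le_rfl

theorem pvComp_eq_F (x : Char) :
    pvSub '_' (pvSub '|' (pvSub '>' (pvSub '<' (pvSub '"' (pvSub '?' (pvSub '*' (pvSub ':'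
      (pvSub '\\' (pvSub '/' (pvSub ' ' x)))))))))) = pvF x := by
  by_cases h1 : x = ' '; · subst h1; decide
  by_cases h2 : x = '/'; · subst h2; decide
  by_cases h3 : x = '\\'; · subst h3; decide
  by_cases h4 : x = ':'; · subst h4; decide
  by_cases h5 : x = '*'; · subst h5; decide
  by_cases h6 : x = '?'; · subst h6; decide
  by_cases h7 : x = '"'; · subst h7; decide
  by_cases h8 : x = '<'; · subst h8; decide
  by_cases h9 : x = '>'; · subst h9; decide
  by_cases h10 : x = '|'; · subst h10; decide
  by_cases h11 : x = '_'; · subst h11; decide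
  by_cases h12 : x = '-'; · subst h12; decide
  simp [pvSub, pvF, pvIsSep, h1, h2, h3, h4, h5, h6, h7, h8, h9, h10, h11, h12]

-- the mapped-and-collapsed characterisation of A's loop
def pvLoopList (l : List Char) : List Char :=
  if h : pvHasDD l = true then pvLoopList (pvRep2 l) else l
termination_by l.length
decreasing_by exact pvRep2_length_lt l h

theorem pvReplace_dd_str (s : String) :
    (PySem.Str.replace s "--" "-").toList = pvRep2 s.toList := by
  have h1 : ("--" : String).toList = ['-', '-'] := rfl
  have h2 : ("-" : String).toList = ['-'] := rfl
  rw [PySem.Str.toList_replace, h1, h2, pvReplace_dd]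

theorem pvIsIn_dd (s : String) : PySem.Str.isIn "--" s = pvHasDD s.toList := by
  have h2 : ("--" : String).toList = ['-', '-'] := rfl
  have h3 := PySem.Str.isIn_iff_infix "--" s
  rw [h2, ← pvHasDD_iff] at h3
  exact Bool.eq_iff_iff.mpr h3

theorem pvKebabLoop_toList (s : String) : (pvKebabLoop s).toList = pvLoopList s.toList := by
  fun_induction pvKebabLoop s with
  | case1 s h ih =>
    rw [pvLoopList, dif_pos (by rw [← pvIsIn_dd]; exact h), ih, pvReplace_dd_str]
  | case2 s h =>
    rw [pvLoopList, dif_neg (by rw [← pvIsIn_dd]; simpa using h)]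

theorem pvCb_rep2 (l : List Char) : ∀ b, pvCb b (pvRep2 l) = pvCb b l := by
  fun_induction pvRep2 l with
  | case1 => intro b; rfl
  | case2 x => intro b; rfl
  | case3 x y t h ih =>
    intro b
    obtain ⟨hx, hy⟩ : x = '-' ∧ y = '-' := by simpa using h
    subst hx; subst hy
    cases b <;> simp [pvCb, ih]
  | case4 x y t h ih =>
    intro b
    by_cases hx : x = '-' <;> cases b <;> simp [pvCb, hx, ih]

theorem pvCb_no_dd (l : List Char) :
    ∀ b, pvHasDD l = false → (b = true → l.head? ≠ some '-') → pvCb b l = l := by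
  fun_induction pvHasDD l with
  | case1 => intro b _ _; rfl
  | case2 x =>
    intro b _ hb
    have hcb : ¬ ((x = '-' && b) = true) := by
      simp only [Bool.and_eq_true, decide_eq_true_eq]
      rintro ⟨hx, hbt⟩
      exact hb hbt (by simp [hx])
    simp only [pvCb, if_neg hcb]
  | case3 x y t ih =>
    intro b h hb
    have h' : (x = '-' && y = '-') = false ∧ pvHasDD (y :: t) = false := by
      rw [← Bool.or_eq_false_iff]
      exact h
    clear h
    obtain ⟨h1, h2⟩ := h'
    have hcb : ¬ ((x = '-' && b) = true) := by
      simp only [Bool.and_eq_true, decide_eq_true_eq]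
      rintro ⟨hx, hbt⟩
      exact hb hbt (by simp [hx])
    have htail : pvCb (x = '-') (y :: t) = y :: t := by
      apply ih _ h2
      intro hx
      simp only [decide_eq_true_eq] at hx
      intro hy
      simp only [List.head?_cons, Option.some.injEq] at hy
      simp [hx, hy] at h1
    show (if (decide (x = '-') && b) = true then pvCb b (y :: t)
        else x :: pvCb (decide (x = '-')) (y :: t)) = x :: y :: t
    rw [if_neg hcb, htail]

theorem pvLoopList_eq_cb (l : List Char) : pvLoopList l = pvCb false l := by
  fun_induction pvLoopList l with
  | case1 l h ih => rw [ih, pvCb_rep2]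
  | case2 l h =>
    rw [pvCb_no_dd l false (by simpa using h) (by simp)]

theorem pvFold_eq_cb (l acc : List Char) :
    l.foldl (fun out ch =>
      if (" /\\:*?\"<>|_-".toList).contains ch then
        if out.getLast? == some '-' then out else out ++ ['-']
      else out ++ [ch]) acc
    = acc ++ pvCb (acc.getLast? == some '-') (l.map pvF) := by
  induction l generalizing acc with
  | nil => simp [pvCb]
  | cons c t ih =>
    rw [List.map_cons, List.foldl_cons]
    by_cases hs : ((" /\\:*?\"<>|_-".toList).contains c) = true
    · have hsep : pvIsSep c = true := hs
      have hFc : pvF c = '-' := by simp [pvF, hsep]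
      rw [if_pos hs, hFc]
      by_cases hl : (acc.getLast? == some '-') = true
      · rw [if_pos hl, ih, hl]
        simp [pvCb]
      · rw [Bool.not_eq_true] at hl
        rw [hl, if_neg (by simp), ih]
        rw [List.getLast?_concat]
        simp [pvCb]
    · have hc : c ≠ '-' := by
        intro hcc; subst hcc; simp at hs
      have hsep : pvIsSep c = false := Bool.eq_false_iff.mpr hs
      have hFc : pvF c = c := by simp [pvF, hsep]
      rw [if_neg hs, hFc, ih, List.getLast?_concat]
      have h1 : (some c == some '-') = false := by simp [hc]
      have h2 : ∀ b, pvCb b (c :: t.map pvF) = c :: pvCb false (t.map pvF) := by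
        intro b; simp [pvCb, hc]
      rw [h1, h2]
      simp

-- ===== VERDICT (by name: the statement is the Claim_ definition above) =====
set_option maxHeartbeats 1000000 in
theorem pvR2_toList (s : String) :
    (("/\\:*?\"<>|_".toList).foldl (fun r ch => PySem.Str.replace r (String.ofList [ch]) "-") s).toList
      = s.toList.map (fun x => pvSub '_' (pvSub '|' (pvSub '>' (pvSub '<' (pvSub '"' (pvSub '?'
          (pvSub '*' (pvSub ':' (pvSub '\\' (pvSub '/' x)))))))))) := by
  have h : "/\\:*?\"<>|_".toList = ['/', '\\', ':', '*', '?', '"', '<', '>', '|', '_'] := rfl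
  rw [h]
  have hd : ("-" : String).toList = ['-'] := rfl
  have ho : ∀ ch : Char, (String.ofList [ch]).toList = [ch] := fun _ => String.toList_ofList
  simp only [List.foldl_cons, List.foldl_nil, PySem.Str.toList_replace, hd, ho, pvReplace_single,
    List.map_map]
  simp only [Function.comp_def]

set_option maxHeartbeats 1000000 in
theorem to_kebab_case_spec : Claim_equal_to_kebab_case := by
  intro name _
  simp only [Spec_to_kebab_case, to_kebab_case, to_kebab_case_alt]
  apply String.toList_inj.mp
  have hd : ("-" : String).toList = ['-'] := rfl
  have hA : (pvKebabLoop (("/\\:*?\"<>|_".toList).foldl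
      (fun r ch => PySem.Str.replace r (String.ofList [ch]) "-")
      (PySem.Str.replace (PySem.Str.strip name) " " "-"))).toList
      = pvCb false ((PySem.Str.strip name).toList.map pvF) := by
    rw [pvKebabLoop_toList, pvLoopList_eq_cb, pvR2_toList]
    have h1 : (PySem.Str.replace (PySem.Str.strip name) " " "-").toList
        = (PySem.Str.strip name).toList.map (pvSub ' ') := by
      have hsp : (" " : String).toList = [' '] := rfl
      rw [PySem.Str.toList_replace, hsp, hd, pvReplace_single]
    rw [h1, List.map_map]
    simp only [Function.comp_def]
    exact congrArg (pvCb false) (List.map_congr_left (fun x _ => pvComp_eq_F x))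
  simp only [PySem.Str.toList_lower, PySem.Str.toList_stripChars, hd, String.toList_ofList]
  rw [hA, pvFold_eq_cb, show (((List.getLast? ([] : List Char))) == some '-') = false from rfl]
  simp only [List.nil_append]
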